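-- pv_equiv track=rewrite | github.com/ronghuang0/leetcode | 525/525.py | findMaxLength
-- ===== SOURCE A (Python) =====
-- from typing import List
--
-- def findMaxLength(nums: List[int]) -> int:
--     map={}
--     map[0]=-1
--     sum=0
--     res=0
--     for i in range(len(nums)):
--         if nums[i]==1:
--             sum+=1
--         else:
--             sum-=1
--         if sum in map:
--             res=max(res,i-map[sum])
--         else:
--             map[sum]=i
--     return res
-- ===== SOURCE B (Python) =====
-- from typing import List
--
-- def findMaxLength(nums: List[int]) -> int:
--     n = len(nums)
--     res = 0
--     for i in range(n):
--         bal = 0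
--         for j in range(i, n):
--             if nums[j] == 1:
--                 bal += 1
--             else:
--                 bal -= 1
--             if bal == 0:
--                 res = max(res, j - i + 1)
--     return res
-- ===== Notes on version B (the rewrite author's own statement) =====
-- stated objective: alternative
-- what changed: Replaced the prefix-sum + first-occurrence hashmap single pass by a brute-force double loop that restarts a running balance at every start index and records every window whose balance returns to zero; no map and no prefix bookkeeping remain.
import Mathlib
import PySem

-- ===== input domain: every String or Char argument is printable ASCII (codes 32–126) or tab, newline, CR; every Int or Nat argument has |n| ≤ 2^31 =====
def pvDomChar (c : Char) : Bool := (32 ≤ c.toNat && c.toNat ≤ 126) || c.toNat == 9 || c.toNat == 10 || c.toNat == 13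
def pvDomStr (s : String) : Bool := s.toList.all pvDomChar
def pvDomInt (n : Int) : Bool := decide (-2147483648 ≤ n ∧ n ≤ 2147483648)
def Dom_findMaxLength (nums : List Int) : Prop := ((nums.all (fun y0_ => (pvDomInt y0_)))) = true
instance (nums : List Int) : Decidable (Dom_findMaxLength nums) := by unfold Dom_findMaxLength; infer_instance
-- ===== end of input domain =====

-- B replaces A's prefix-sum + first-occurrence hashmap pass by a brute-force double loop (alternative structure, not faster); return values proved equal on all inputs.

-- ===== PORT A =====
-- one pass: prefix balance + dict of the first index at which each balance value occurred
def findMaxLength (nums : List Int) : Int :=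
  let st := (List.range nums.length).foldl
    (fun (st : PySem.Dict Int Int × Int × Int) i =>
      let sum := if nums.getD i 0 = 1 then st.2.1 + 1 else st.2.1 - 1
      if st.1.contains sum then
        (st.1, sum, max st.2.2 ((i : Int) - st.1.getD sum 0))
      else
        (st.1.insert sum (i : Int), sum, st.2.2))
    ((PySem.Dict.empty).insert 0 (-1), 0, 0)
  st.2.2

-- ===== PORT B =====
-- brute force: for every start i, rescan with a fresh balance, record every balanced window
def findMaxLength_alt (nums : List Int) : Int :=
  let n := nums.length
  (List.range n).foldl
    (fun res i =>
      ((List.range' i (n - i)).foldl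
        (fun (st : Int × Int) j =>
          let bal := if nums.getD j 0 = 1 then st.1 + 1 else st.1 - 1
          (bal, if bal = 0 then max st.2 ((j : Int) - (i : Int) + 1) else st.2))
        (0, res)).2)
    0

-- ===== PRECONDITION & SPEC =====
def Spec_findMaxLength (nums : List Int) (out : Int) : Prop := out = findMaxLength_alt nums
instance (nums : List Int) (out : Int) : Decidable (Spec_findMaxLength nums out) := by unfold Spec_findMaxLength; infer_instance

-- ===== CLAIM (what is proved, stated in full; the proofs are below) =====
def Claim_equal_findMaxLength : Prop := ∀ (nums : List Int), Dom_findMaxLength nums → Spec_findMaxLength nums (findMaxLength nums)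

-- ===== LEMMAS AND PROOFS =====

-- the ±1 contribution of one element
def pvStp (x : Int) : Int := if x = 1 then 1 else -1

-- prefix balance of the first k elements
def pvPre (nums : List Int) (k : Nat) : Int := ((nums.take k).map pvStp).sum

-- first index whose prefix balance equals pvPre nums b
def pvFirst (nums : List Int) (b : Nat) : Nat :=
  (((List.range (b+1)).find? (fun k => pvPre nums k == pvPre nums b))).getD b

-- best window ending at prefix b
def pvF (nums : List Int) (b : Nat) : Int := (b : Int) - (pvFirst nums b : Int)

-- running best over prefixes 0..t (A's res after t iterations)
def pvR (nums : List Int) (t : Nat) : Int :=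
  ((List.range (t+1)).map (pvF nums)).foldl max 0

-- A's dict after t iterations, characterised by lookup
def pvMapInv (nums : List Int) (t : Nat) (m : PySem.Dict Int Int) : Prop :=
  ∀ s : Int, m.get? s =
    ((List.range (t+1)).find? (fun k => pvPre nums k == s)).map (fun k => (k : Int) - 1)

lemma pvPre_succ (nums : List Int) (t : Nat) (ht : t < nums.length) :
    pvPre nums (t+1) = pvPre nums t + pvStp (nums.getD t 0) := by
  unfold pvPre
  rw [List.take_add_one, List.map_append, List.sum_append, List.getElem?_eq_getElem ht]
  simp [List.getD_eq_getElem?_getD, List.getElem?_eq_getElem ht]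

lemma pvFirst_found (nums : List Int) (b : Nat) :
    (List.range (b+1)).find? (fun k => pvPre nums k == pvPre nums b) = some (pvFirst nums b) := by
  have h : ((List.range (b+1)).find? (fun k => pvPre nums k == pvPre nums b)).isSome := by
    rw [List.find?_isSome]; exact ⟨b, by simp, by simp⟩
  rcases Option.isSome_iff_exists.1 h with ⟨k, hk⟩
  simp [pvFirst, hk]

lemma pvFirst_spec (nums : List Int) (b : Nat) :
    pvPre nums (pvFirst nums b) = pvPre nums b ∧ pvFirst nums b ≤ b ∧
    ∀ a ≤ b, pvPre nums a = pvPre nums b → pvFirst nums b ≤ a := by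
  have h := pvFirst_found nums b
  rw [List.range_eq_range', List.find?_range'_eq_some] at h
  obtain ⟨h1, h2, h3⟩ := h
  refine ⟨by simpa using h1, by simpa using Nat.lt_succ_iff.1 (by simpa using h2), ?_⟩
  intro a ha hpa
  by_contra hlt
  have := h3 a (Nat.zero_le a) (by omega)
  simp [hpa] at this

lemma pvR_succ (nums : List Int) (t : Nat) :
    pvR nums (t+1) = max (pvR nums t) (pvF nums (t+1)) := by
  unfold pvR
  rw [List.range_succ, List.map_append, List.foldl_append]
  simp

lemma pvR_nonneg (nums : List Int) (t : Nat) : 0 ≤ pvR nums t :=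
  (PySem.List.le_foldl_max _ _).1

lemma pvF_le_R (nums : List Int) (b t : Nat) (hb : b ≤ t) : pvF nums b ≤ pvR nums t :=
  (PySem.List.le_foldl_max _ _).2 _ (List.mem_map_of_mem (by simp; omega))

lemma pv_foldl_max_le {l : List Int} {a c : Int} (ha : a ≤ c) (h : ∀ x ∈ l, x ≤ c) :
    l.foldl max a ≤ c := by
  induction l generalizing a with
  | nil => exact ha
  | cons x xs ih =>
    exact ih (max_le ha (h x (by simp))) (fun y hy => h y (by simp [hy]))

lemma pvR_le (nums : List Int) (t : Nat) (c : Int) (hc : 0 ≤ c)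
    (h : ∀ b ≤ t, pvF nums b ≤ c) : pvR nums t ≤ c := by
  refine pv_foldl_max_le hc ?_
  intro x hx
  rcases List.mem_map.1 hx with ⟨b, hb, rfl⟩
  exact h b (by simpa using Nat.lt_succ_iff.1 (List.mem_range.1 hb))

-- A's loop invariant
lemma pvA_loop (nums : List Int) (t : Nat) (ht : t ≤ nums.length) :
    ∃ m, pvMapInv nums t m ∧
      (List.range t).foldl
        (fun (st : PySem.Dict Int Int × Int × Int) i =>
          let sum := if nums.getD i 0 = 1 then st.2.1 + 1 else st.2.1 - 1
          if st.1.contains sum then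
            (st.1, sum, max st.2.2 ((i : Int) - st.1.getD sum 0))
          else
            (st.1.insert sum (i : Int), sum, st.2.2))
        ((PySem.Dict.empty).insert 0 (-1), 0, 0)
      = (m, pvPre nums t, pvR nums t) := by
  induction t with
  | zero =>
    refine ⟨(PySem.Dict.empty).insert 0 (-1), ?_, ?_⟩
    · intro s
      by_cases hs : s = 0
      · subst hs
        simp [PySem.Dict.get?_insert_self, pvPre, List.range_succ]
      · rw [PySem.Dict.get?_insert_of_ne _ _ hs, PySem.Dict.get?_empty]
        have : pvPre nums 0 = 0 := by simp [pvPre]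
        simp [List.range_succ, this, Ne.symm hs]
    · simp [pvPre, pvR, pvF, pvFirst, List.range_succ]
  | succ t ih =>
    obtain ⟨m, hm, hfold⟩ := ih (by omega)
    rw [List.range_succ, List.foldl_append, hfold]
    simp only [List.foldl_cons, List.foldl_nil]
    have hsum : (if nums.getD t 0 = 1 then pvPre nums t + 1 else pvPre nums t - 1)
        = pvPre nums (t+1) := by
      rw [pvPre_succ nums t (by omega)]
      simp only [pvStp]
      by_cases h : nums.getD t 0 = 1
      · rw [if_pos h, if_pos h]
      · rw [if_neg h, if_neg h]; ring
    rw [hsum]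
    have hcont : m.contains (pvPre nums (t+1))
        = (((List.range (t+1)).find? (fun k => pvPre nums k == pvPre nums (t+1))).isSome) := by
      rw [PySem.Dict.contains_eq_isSome_get?, hm]
      cases (List.range (t+1)).find? (fun k => pvPre nums k == pvPre nums (t+1)) <;> rfl
    by_cases hc : ∃ k0, (List.range (t+1)).find? (fun k => pvPre nums k == pvPre nums (t+1)) = some k0
    · obtain ⟨k0, hk0⟩ := hc
      have hcontT : m.contains (pvPre nums (t+1)) = true := by rw [hcont, hk0]; rfl
      have hfind2 : (List.range (t+2)).find? (fun k => pvPre nums k == pvPre nums (t+1)) = some k0 := by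
        rw [List.range_succ, List.find?_append, hk0]; rfl
      have hfirst : pvFirst nums (t+1) = k0 := by
        have := pvFirst_found nums (t+1)
        rw [hfind2] at this; exact (Option.some_injective _ this.symm)
      have hget : m.getD (pvPre nums (t+1)) 0 = (k0 : Int) - 1 := by
        rw [PySem.Dict.getD_eq_get?_getD, hm, hk0]; rfl
      refine ⟨m, ?_, ?_⟩
      · intro s
        rw [hm s]
        conv_rhs => rw [List.range_succ, List.find?_append]
        cases hL : (List.range (t+1)).find? (fun k => pvPre nums k == s) with
        | some v => simp
        | none =>
          have hne : pvPre nums (t+1) ≠ s := by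
            intro h; subst h; rw [hL] at hk0; cases hk0
          simp [hne]
      · rw [hcontT, hget]
        simp only [if_true]
        rw [pvR_succ]
        have hFe : (t : Int) - ((k0 : Int) - 1) = pvF nums (t+1) := by
          rw [pvF, hfirst]; push_cast; ring
        rw [hFe]
    · push Not at hc
      have hnone : (List.range (t+1)).find? (fun k => pvPre nums k == pvPre nums (t+1)) = none := by
        cases h : (List.range (t+1)).find? (fun k => pvPre nums k == pvPre nums (t+1)) with
        | none => rfl
        | some v => exact absurd h (hc v)
      have hcontF : m.contains (pvPre nums (t+1)) = false := by rw [hcont, hnone]; rfl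
      have hfind2 : (List.range (t+2)).find? (fun k => pvPre nums k == pvPre nums (t+1)) = some (t+1) := by
        rw [List.range_succ, List.find?_append, hnone]
        simp
      have hfirst : pvFirst nums (t+1) = t+1 := by
        have := pvFirst_found nums (t+1)
        rw [hfind2] at this; exact (Option.some_injective _ this.symm)
      refine ⟨m.insert (pvPre nums (t+1)) (t : Int), ?_, ?_⟩
      · intro s
        rw [PySem.Dict.get?_insert]
        by_cases hs : s = pvPre nums (t+1)
        · subst hs
          rw [if_pos rfl, hfind2]
          congr 1
          push_cast
          ring
        · rw [if_neg hs, hm s]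
          conv_rhs => rw [List.range_succ, List.find?_append]
          have hne : (pvPre nums (t+1) == s) = false := by
            simp [Ne.symm hs]
          cases hL : (List.range (t+1)).find? (fun k => pvPre nums k == s) with
          | some v => simp
          | none => simp [hne]
      · rw [hcontF]
        simp only [Bool.false_eq_true, if_false]
        rw [pvR_succ]
        have hF0 : pvF nums (t+1) = 0 := by simp [pvF, hfirst]
        rw [hF0, max_eq_left (pvR_nonneg nums t)]

lemma pvA_eq (nums : List Int) : findMaxLength nums = pvR nums nums.length := by
  obtain ⟨m, _, hfold⟩ := pvA_loop nums nums.length le_rfl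
  simp only [findMaxLength]
  rw [hfold]

-- B-side: inner loop characterisation (pair state collapses to a conditional running max)
lemma pvB_inner (nums : List Int) (i : Nat) (res0 : Int) :
    ∀ m : Nat, i + m ≤ nums.length →
    (List.range' i m).foldl
      (fun (st : Int × Int) j =>
        let bal := if nums.getD j 0 = 1 then st.1 + 1 else st.1 - 1
        (bal, if bal = 0 then max st.2 ((j : Int) - (i : Int) + 1) else st.2))
      (0, res0)
    = (pvPre nums (i + m) - pvPre nums i,
       (List.range' i m).foldl
         (fun r j => if pvPre nums (j+1) = pvPre nums i then max r ((j : Int) - (i : Int) + 1) else r)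
         res0) := by
  intro m
  induction m with
  | zero => simp
  | succ m ih =>
    intro hm
    rw [List.range'_1_concat, List.foldl_append, List.foldl_append, ih (by omega)]
    simp only [List.foldl_cons, List.foldl_nil]
    have hbal : (if nums.getD (i+m) 0 = 1 then (pvPre nums (i+m) - pvPre nums i) + 1
          else (pvPre nums (i+m) - pvPre nums i) - 1)
        = pvPre nums (i+m+1) - pvPre nums i := by
      rw [pvPre_succ nums (i+m) (by omega)]
      simp only [pvStp]
      by_cases h : nums.getD (i+m) 0 = 1
      · rw [if_pos h, if_pos h]; ring
      · rw [if_neg h, if_neg h]; ring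
    rw [hbal]
    have hcond : (pvPre nums (i+m+1) - pvPre nums i = 0) ↔ (pvPre nums (i+m+1) = pvPre nums i) := by
      constructor <;> intro h <;> omega
    by_cases hc : pvPre nums (i+m+1) = pvPre nums i
    · rw [if_pos (hcond.2 hc), if_pos hc]; rfl
    · rw [if_neg (fun h => hc (hcond.1 h)), if_neg hc]; rfl

-- generic facts about monotone accumulating folds
lemma pv_foldl_mono {α : Type} (g : Int → α → Int) (l : List α)
    (hg : ∀ r : Int, ∀ x ∈ l, r ≤ g r x) (init : Int) : init ≤ l.foldl g init := by
  induction l generalizing init with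
  | nil => exact le_refl _
  | cons x xs ih =>
    exact le_trans (hg init x (by simp)) (ih (fun r y hy => hg r y (by simp [hy])) _)

lemma pv_foldl_attain {α : Type} (g : Int → α → Int) {l : List α}
    (hg : ∀ r : Int, ∀ x ∈ l, r ≤ g r x) {x : α} (hx : x ∈ l) {c : Int}
    (hc : ∀ r, c ≤ g r x) (init : Int) : c ≤ l.foldl g init := by
  induction l generalizing init with
  | nil => cases hx
  | cons y ys ih =>
    rcases List.mem_cons.1 hx with rfl | hmem
    · exact le_trans (hc init) (pv_foldl_mono g ys (fun r z hz => hg r z (by simp [hz])) _)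
    · exact ih (fun r z hz => hg r z (by simp [hz])) hmem _

lemma pv_foldl_bound {α : Type} (g : Int → α → Int) {l : List α} {c init : Int}
    (hinit : init ≤ c) (h : ∀ r : Int, ∀ x ∈ l, r ≤ c → g r x ≤ c) :
    l.foldl g init ≤ c := by
  induction l generalizing init with
  | nil => exact hinit
  | cons x xs ih =>
    exact ih (h init x (by simp) hinit) (fun r y hy hr => h r y (by simp [hy]) hr)

-- the inner conditional-max step only grows the accumulator
lemma pvInner_mono (nums : List Int) (i : Nat) (r : Int) (j : Nat) :
    r ≤ (if pvPre nums (j+1) = pvPre nums i then max r ((j : Int) - (i : Int) + 1) else r) := by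
  split_ifs <;> simp

-- B rewritten with the inner loops collapsed
lemma pvB_rw (nums : List Int) :
    findMaxLength_alt nums = (List.range nums.length).foldl
      (fun res i => (List.range' i (nums.length - i)).foldl
        (fun r j => if pvPre nums (j+1) = pvPre nums i then max r ((j : Int) - (i : Int) + 1) else r)
        res) 0 := by
  simp only [findMaxLength_alt]
  refine PySem.List.foldl_congr_mem _ _ _ _ ?_
  intro acc i hi
  rw [pvB_inner nums i acc (nums.length - i) (by have := List.mem_range.1 hi; omega)]

-- B's three characterising properties
lemma pvB_eq_bounds (nums : List Int) :
    (0 ≤ findMaxLength_alt nums) ∧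
    (∀ a b : Nat, a < b → b ≤ nums.length → pvPre nums b = pvPre nums a →
        (b : Int) - (a : Int) ≤ findMaxLength_alt nums) ∧
    (∀ c : Int, 0 ≤ c →
        (∀ a b : Nat, a < b → b ≤ nums.length → pvPre nums b = pvPre nums a →
            (b : Int) - (a : Int) ≤ c) →
        findMaxLength_alt nums ≤ c) := by
  rw [pvB_rw]
  have houter : ∀ (res : Int), ∀ i ∈ List.range nums.length,
      res ≤ (List.range' i (nums.length - i)).foldl
        (fun r j => if pvPre nums (j+1) = pvPre nums i then max r ((j : Int) - (i : Int) + 1) else r)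
        res := by
    intro res i _
    exact pv_foldl_mono _ _ (fun r j _ => pvInner_mono nums i r j) res
  refine ⟨pv_foldl_mono _ _ houter 0, ?_, ?_⟩
  · intro a b hab hb hpre
    refine pv_foldl_attain _ houter (x := a) (List.mem_range.2 (by omega)) ?_ 0
    intro r
    refine pv_foldl_attain _ (fun r j _ => pvInner_mono nums a r j) (x := b - 1)
      (List.mem_range'_1.2 (by omega)) ?_ r
    intro r'
    have hb1 : b - 1 + 1 = b := by omega
    rw [hb1, if_pos hpre]
    have : ((b - 1 : Nat) : Int) - (a : Int) + 1 = (b : Int) - (a : Int) := by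
      have : (1:Nat) ≤ b := by omega
      push_cast [Nat.cast_sub this]
      ring
    rw [this]
    exact le_max_right _ _
  · intro c hc hpairs
    refine pv_foldl_bound _ hc ?_
    intro res i hi hres
    refine pv_foldl_bound _ hres ?_
    intro r j hj hr
    split_ifs with hp
    · have hjm := List.mem_range'_1.1 hj
      have hin := List.mem_range.1 hi
      have hpair := hpairs i (j+1) (by omega) (by omega) hp
      have : ((j:Int) - (i:Int) + 1) = ((j+1 : Nat) : Int) - (i : Int) := by push_cast; ring
      rw [max_le_iff]
      exact ⟨hr, by omega⟩
    · exact hr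

-- ===== VERDICT (by name: the statement is the Claim_ definition above) =====
theorem findMaxLength_spec : Claim_equal_findMaxLength := by
  intro nums _
  unfold Spec_findMaxLength
  rw [pvA_eq]
  obtain ⟨hB0, hB2, hB3⟩ := pvB_eq_bounds nums
  apply le_antisymm
  · refine pvR_le nums nums.length _ hB0 ?_
    intro b hb
    obtain ⟨hpre, hle, _⟩ := pvFirst_spec nums b
    rcases Nat.lt_or_ge (pvFirst nums b) b with hlt | hge
    · have := hB2 (pvFirst nums b) b hlt hb hpre.symm
      simpa [pvF] using this
    · have heq : pvFirst nums b = b := le_antisymm hle hge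
      simp [pvF, heq, hB0]
  · refine hB3 _ (pvR_nonneg nums nums.length) ?_
    intro a b hab hb hpre
    obtain ⟨_, _, hmin⟩ := pvFirst_spec nums b
    have h1 : pvFirst nums b ≤ a := hmin a (le_of_lt hab) hpre.symm
    have h2 : pvF nums b ≤ pvR nums nums.length := pvF_le_R nums b nums.length hb
    have h3 : (b : Int) - (a : Int) ≤ pvF nums b := by
      simp only [pvF]; omega
    omega
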